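-- pv_equiv track=rewrite | github.com/ChaikaChaikaChaika/BMSTU-Labs-First-year | lab12.py | is_arithmetic_expression
-- ===== SOURCE A (Python) =====
-- def is_arithmetic_expression(s):  # проверка является ли первая строка арифметическим выражением
--     flag_fd = False  # flag first digit
--     flag_sign = False  # flag for sign
--     flag_sd = False  # flag second digit
--     for i in range(len(s)):
--         if s[i].isdigit() and not flag_fd:
--             flag_fd = True
--         if (s[i] == '+' or s[i] == '-') and flag_fd:
--             flag_sign = True
--         elif s[i].isdigit() and flag_fd == True and flag_sign == True:
--             flag_sd = True
--         if flag_fd and flag_sign and flag_sd: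
--             return True
--     return False
-- ===== SOURCE B (Python) =====
-- def is_arithmetic_expression(s):
--     digits = [i for i, c in enumerate(s) if c.isdigit()]
--     if not digits:
--         return False
--     between = s[digits[0] + 1 : digits[-1]]
--     return any(c == '+' or c == '-' for c in between)
-- ===== Notes on version B (the rewrite author's own statement) =====
-- stated objective: alternative
-- what changed: B first collects all digit positions, then checks whether a plus or minus sign occurs strictly between the first and the last digit position, replacing A's one-pass three-flag state machine.
import Mathlib
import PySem

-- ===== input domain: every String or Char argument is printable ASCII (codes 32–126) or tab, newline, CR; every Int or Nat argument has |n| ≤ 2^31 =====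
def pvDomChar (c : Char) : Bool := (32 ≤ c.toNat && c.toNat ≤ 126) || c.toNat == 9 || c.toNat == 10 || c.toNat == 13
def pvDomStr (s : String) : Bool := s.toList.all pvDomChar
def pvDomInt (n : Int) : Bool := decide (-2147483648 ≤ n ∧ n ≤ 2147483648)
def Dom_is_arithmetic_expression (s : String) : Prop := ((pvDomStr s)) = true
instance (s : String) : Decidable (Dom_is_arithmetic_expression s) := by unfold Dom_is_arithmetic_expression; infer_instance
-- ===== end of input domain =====

-- B collects the digit positions and checks for a plus or minus sign strictly between the
-- first and the last digit position, replacing A's one-pass three-flag state machine (same cost).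

-- ===== PORT A =====
-- the for-loop over indices with the three flags, early return true
def pvLoopA : List Char → Bool → Bool → Bool → Bool
  | [], _, _, _ => false
  | c :: rest, flag_fd, flag_sign, flag_sd =>
    let flag_fd := if c.isDigit && !flag_fd then true else flag_fd
    let st :=
      if (c == '+' || c == '-') && flag_fd then (true, flag_sd)
      else if c.isDigit && flag_fd && flag_sign then (flag_sign, true)
      else (flag_sign, flag_sd)
    if flag_fd && st.1 && st.2 then true
    else pvLoopA rest flag_fd st.1 st.2

def is_arithmetic_expression (s : String) : Bool :=
  pvLoopA s.toList false false false

-- ===== PORT B =====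
-- the comprehension [i for i, c in enumerate(s) if c.isdigit()], with the running index
def pvDigitPos : List Char → Nat → List Nat
  | [], _ => []
  | c :: t, i => if c.isDigit then i :: pvDigitPos t (i + 1) else pvDigitPos t (i + 1)

-- the slice between first and last digit position, then any sign test; both slice bounds are
-- nonnegative here, so Python's slice is exactly drop/take (Nat subtraction = Python's clamp).
def is_arithmetic_expression_alt (s : String) : Bool :=
  match pvDigitPos s.toList 0 with
  | [] => false
  | f :: ds =>
    let lastd := (f :: ds).getLast (List.cons_ne_nil f ds)
    ((s.toList.drop (f + 1)).take (lastd - (f + 1))).any (fun c => c == '+' || c == '-')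

-- ===== PRECONDITION & SPEC =====
def Spec_is_arithmetic_expression (s : String) (out : Bool) : Prop := out = is_arithmetic_expression_alt s
instance (s : String) (out : Bool) : Decidable (Spec_is_arithmetic_expression s out) := by unfold Spec_is_arithmetic_expression; infer_instance

-- ===== CLAIM (what is proved, stated in full; the proofs are below) =====
def Claim_equal_is_arithmetic_expression : Prop := ∀ (s : String), Dom_is_arithmetic_expression s → Spec_is_arithmetic_expression s (is_arithmetic_expression s)

-- ===== LEMMAS AND PROOFS =====

-- staged-scan intermediate form used only by the proof: A's loop equals
-- "find a digit, then a later sign, then a later digit"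
def pvScanDigit (l : List Char) : Bool := l.any Char.isDigit

def pvScanSign (l : List Char) : Bool :=
  match l.dropWhile (fun c => !(c == '+' || c == '-')) with
  | [] => false
  | _ :: rest => pvScanDigit rest

def pvScanFirst (l : List Char) : Bool :=
  match l.dropWhile (fun c => !c.isDigit) with
  | [] => false
  | _ :: rest => pvScanSign rest

-- A sign character is not a digit
lemma pv_sign_not_digit {c : Char} (h : (c == '+' || c == '-') = true) : c.isDigit = false := by
  rcases Bool.or_eq_true_iff.mp h with h' | h' <;>
    simp_all [Char.isDigit, beq_iff_eq]

-- invariant: for every reachable flag state (sd = false, sign implies fd),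
-- the loop equals the corresponding phase of the staged scan
lemma pvLoopA_eq (l : List Char) : ∀ fd sign : Bool, (sign = true → fd = true) →
    pvLoopA l fd sign false =
      (if sign then pvScanDigit l else if fd then pvScanSign l else pvScanFirst l) := by
  induction l with
  | nil => intro fd sign _; cases fd <;> cases sign <;>
      simp [pvLoopA, pvScanDigit, pvScanSign, pvScanFirst]
  | cons c rest ih =>
    intro fd sign hsf
    by_cases hs : (c == '+' || c == '-') = true
    · have hd : c.isDigit = false := pv_sign_not_digit hs
      have hc : c = '+' ∨ c = '-' := by
        rcases Bool.or_eq_true_iff.mp hs with h | h <;> simp_all [beq_iff_eq]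
      cases fd <;> cases sign
      · simp [pvLoopA, hd, hs, pvScanFirst, pvScanSign,
          ih false false (by simp)]
      · exact absurd (hsf rfl) (by simp)
      · rcases hc with rfl | rfl <;>
          simp [pvLoopA, pvScanSign, pvScanDigit, ih true true (by simp)]
      · simp [pvLoopA, hd, hs, pvScanDigit, List.any_cons,
          ih true true (by simp)]
    · have hns : ¬c = '+' ∧ ¬c = '-' := by
        simpa [not_or] using hs
      by_cases hdg : c.isDigit = true
      · cases fd <;> cases sign
        · simp [pvLoopA, hdg, hs, pvScanFirst, pvScanSign,
            ih true false (by simp)]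
        · exact absurd (hsf rfl) (by simp)
        · simp [pvLoopA, hdg, hs, hns, pvScanSign,
            ih true false (by simp)]
        · simp [pvLoopA, hdg, hs, pvScanDigit, List.any_cons]
      · have hdg' : c.isDigit = false := by simpa using hdg
        cases fd <;> cases sign
        · simp [pvLoopA, hdg', hs, pvScanFirst, pvScanSign,
            ih false false (by simp)]
        · exact absurd (hsf rfl) (by simp)
        · simp [pvLoopA, hdg', hs, hns, pvScanSign,
            ih true false (by simp)]
        · simp [pvLoopA, hdg', hs, pvScanDigit, List.any_cons,
            ih true true (by simp)]

-- shifting the index accumulator shifts every recorded position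
lemma pvDigitPos_shift (l : List Char) : ∀ i : Nat,
    pvDigitPos l (i + 1) = (pvDigitPos l i).map (· + 1) := by
  induction l with
  | nil => intro i; simp [pvDigitPos]
  | cons c t ih =>
    intro i
    by_cases h : c.isDigit = true <;> simp [pvDigitPos, h, ih (i + 1)]

-- no recorded digit positions ↔ no digit characters
lemma pvDigitPos_nil_iff (l : List Char) : ∀ i : Nat,
    pvDigitPos l i = [] ↔ ∀ c ∈ l, c.isDigit = false := by
  induction l with
  | nil => intro i; simp [pvDigitPos]
  | cons c t ih =>
    intro i
    by_cases h : c.isDigit = true <;> simp [pvDigitPos, h, ih (i + 1)]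



lemma pv_getLast?_cons {α : Type} (a : α) (l : List α) (h : l ≠ []) :
    (a :: l).getLast? = l.getLast? := by
  cases l with
  | nil => exact absurd rfl h
  | cons b m => simp [List.getLast?_cons]

-- one step of the sign scan
lemma pvScanSign_cons_sign {c : Char} {t : List Char} (hs : (c == '+' || c == '-') = true) :
    pvScanSign (c :: t) = pvScanDigit t := by
  have hc : c = '+' ∨ c = '-' := by
    rcases Bool.or_eq_true_iff.mp hs with h | h <;> simp_all [beq_iff_eq]
  rcases hc with rfl | rfl <;> simp [pvScanSign]

lemma pvScanSign_cons_not_sign {c : Char} {t : List Char} (hs : ¬((c == '+' || c == '-') = true)) :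
    pvScanSign (c :: t) = pvScanSign t := by
  have hns : ¬c = '+' ∧ ¬c = '-' := by simpa [not_or] using hs
  simp [pvScanSign, hns.1, hns.2]

-- some digit positions recorded → the list contains a digit
lemma pvScanDigit_of_ne_nil {t : List Char} (hne : pvDigitPos t 0 ≠ []) :
    pvScanDigit t = true := by
  by_contra h
  have hall : ∀ x ∈ t, x.isDigit = false := by
    intro x hx
    by_contra hxd
    apply h
    simp only [pvScanDigit, List.any_eq_true]
    exact ⟨x, hx, by simpa using hxd⟩
  exact hne ((pvDigitPos_nil_iff t 0).mpr hall)

lemma pvScanSign_no_digit {l : List Char} (h : ∀ c ∈ l, c.isDigit = false) :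
    pvScanSign l = false := by
  induction l with
  | nil => simp [pvScanSign]
  | cons c t ih =>
    by_cases hs : (c == '+' || c == '-') = true
    · rw [pvScanSign_cons_sign hs]
      simp only [pvScanDigit, List.any_eq_false]
      intro x hx
      simp [h x (List.mem_cons_of_mem _ hx)]
    · rw [pvScanSign_cons_not_sign hs]
      exact ih (fun x hx => h x (List.mem_cons_of_mem _ hx))

-- key bridge: the sign-then-digit scan equals "a sign occurs before the last digit"
lemma pvScanSign_eq_last (l : List Char) :
    pvScanSign l =
      match (pvDigitPos l 0).getLast? with
      | none => false
      | some L => (l.take L).any (fun c => c == '+' || c == '-') := by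
  induction l with
  | nil => simp [pvScanSign, pvDigitPos]
  | cons c t ih =>
    by_cases hs : (c == '+' || c == '-') = true
    · have hd : c.isDigit = false := pv_sign_not_digit hs
      have hpos : pvDigitPos (c :: t) 0 = (pvDigitPos t 0).map (· + 1) := by
        simp [pvDigitPos, hd, pvDigitPos_shift]
      rw [pvScanSign_cons_sign hs, hpos]
      rcases hP : (pvDigitPos t 0).getLast? with _ | L
      · have hnil : pvDigitPos t 0 = [] := List.getLast?_eq_none_iff.mp hP
        have hnd : ∀ x ∈ t, x.isDigit = false := (pvDigitPos_nil_iff t 0).mp hnil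
        have hzero : pvScanDigit t = false := by
          simp only [pvScanDigit, List.any_eq_false]
          intro x hx
          simp [hnd x hx]
        simp [hzero, hnil]
      · have hne : pvDigitPos t 0 ≠ [] := by
          intro h; rw [h] at hP; simp at hP
        have hd2 : pvScanDigit t = true := pvScanDigit_of_ne_nil hne
        simp [hd2, List.getLast?_map, hP, hs]
    · rw [pvScanSign_cons_not_sign hs]
      by_cases hdg : c.isDigit = true
      · have hpos : pvDigitPos (c :: t) 0 = 0 :: (pvDigitPos t 0).map (· + 1) := by
          simp [pvDigitPos, hdg, pvDigitPos_shift]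
        rw [hpos]
        rcases hP : (pvDigitPos t 0).getLast? with _ | L
        · have hnil : pvDigitPos t 0 = [] := List.getLast?_eq_none_iff.mp hP
          have hnd : ∀ x ∈ t, x.isDigit = false := (pvDigitPos_nil_iff t 0).mp hnil
          simp [pvScanSign_no_digit hnd, hnil]
        · have hne : (pvDigitPos t 0).map (· + 1) ≠ [] := by
            intro h
            exact absurd hP (by simp [List.map_eq_nil_iff.mp h])
          have hlast : (0 :: (pvDigitPos t 0).map (· + 1)).getLast? = some (L + 1) := by
            rw [pv_getLast?_cons _ _ hne, List.getLast?_map, hP]; rfl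
          simp only [hlast, ih, hP]
          simp [List.take_succ_cons, hs]
      · have hpos : pvDigitPos (c :: t) 0 = (pvDigitPos t 0).map (· + 1) := by
          simp [pvDigitPos, hdg, pvDigitPos_shift]
        rw [hpos]
        rcases hP : (pvDigitPos t 0).getLast? with _ | L
        · have hnil : pvDigitPos t 0 = [] := List.getLast?_eq_none_iff.mp hP
          simp [ih, hnil]
        · simp only [List.getLast?_map, hP, ih]
          simp [List.take_succ_cons, hs]

-- the staged scan equals B's first/last-digit formulation
lemma pvScanFirst_eq_alt (l : List Char) :
    pvScanFirst l =
      (match pvDigitPos l 0 with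
       | [] => false
       | f :: ds =>
         ((l.drop (f + 1)).take ((f :: ds).getLast (List.cons_ne_nil f ds) - (f + 1))).any
           (fun c => c == '+' || c == '-')) := by
  induction l with
  | nil => simp [pvScanFirst, pvDigitPos]
  | cons c t ih =>
    by_cases hdg : c.isDigit = true
    · have hpos : pvDigitPos (c :: t) 0 = 0 :: (pvDigitPos t 0).map (· + 1) := by
        simp [pvDigitPos, hdg, pvDigitPos_shift]
      have hfirst : pvScanFirst (c :: t) = pvScanSign t := by
        simp [pvScanFirst, hdg]
      rcases hP : (pvDigitPos t 0).getLast? with _ | L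
      · have hnil : pvDigitPos t 0 = [] := List.getLast?_eq_none_iff.mp hP
        have hnd : ∀ x ∈ t, x.isDigit = false := (pvDigitPos_nil_iff t 0).mp hnil
        simp [hfirst, pvScanSign_no_digit hnd, hpos, hnil]
      · have hne : (pvDigitPos t 0).map (· + 1) ≠ [] := by
          intro h
          exact absurd hP (by simp [List.map_eq_nil_iff.mp h])
        have hlast : ((0 : Nat) :: (pvDigitPos t 0).map (· + 1)).getLast (List.cons_ne_nil _ _) = L + 1 := by
          have h1 := pv_getLast?_cons (0 : Nat) ((pvDigitPos t 0).map (· + 1)) hne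
          rw [List.getLast?_map, hP] at h1
          have h2 := List.getLast?_eq_some_getLast
            (l := (0 : Nat) :: (pvDigitPos t 0).map (· + 1)) (List.cons_ne_nil _ _)
          rw [h1] at h2
          exact (Option.some.inj h2).symm
        simp only [hfirst, hpos, pvScanSign_eq_last t, hP, hlast]
        simp
    · have hpos : pvDigitPos (c :: t) 0 = (pvDigitPos t 0).map (· + 1) := by
        simp [pvDigitPos, hdg, pvDigitPos_shift]
      have hfirst : pvScanFirst (c :: t) = pvScanFirst t := by
        simp [pvScanFirst, hdg]
      rcases hQ : pvDigitPos t 0 with _ | ⟨f, ds⟩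
      · simp [hfirst, ih, hQ, hpos]
      · have hlast : ((f + 1) :: ds.map (· + 1)).getLast (List.cons_ne_nil _ _) =
            (f :: ds).getLast (List.cons_ne_nil f ds) + 1 := by
          have h1 : ((f + 1) :: ds.map (· + 1)).getLast? =
              some ((f :: ds).getLast (List.cons_ne_nil f ds) + 1) := by
            have hm : ((f + 1) :: ds.map (· + 1)) = (f :: ds).map (· + 1) := by simp
            rw [hm, List.getLast?_map, List.getLast?_eq_some_getLast (List.cons_ne_nil f ds)]
            rfl
          have h2 := List.getLast?_eq_some_getLast
            (l := (f + 1) :: ds.map (· + 1)) (List.cons_ne_nil _ _)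
          rw [h1] at h2
          exact (Option.some.inj h2).symm
        simp only [hfirst, ih, hQ, hpos, List.map_cons, hlast]
        have harith : (f :: ds).getLast (List.cons_ne_nil f ds) + 1 - (f + 1 + 1) =
            (f :: ds).getLast (List.cons_ne_nil f ds) - (f + 1) := by omega
        simp [harith]

-- ===== VERDICT (by name: the statement is the Claim_ definition above) =====
theorem is_arithmetic_expression_spec : Claim_equal_is_arithmetic_expression := by
  intro s _
  unfold Spec_is_arithmetic_expression is_arithmetic_expression is_arithmetic_expression_alt
  rw [pvLoopA_eq s.toList false false (by simp)]
  simpa using pvScanFirst_eq_alt s.toList
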